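-- pv_equiv track=rewrite | github.com/dweinflash/IHC-Scheduler_SAT-Solver | test.py | group_results_by
-- ===== SOURCE A (Python) =====
-- def group_results_by(res, key):
--     # Interps or teachers in list grouped according to num
--     # [ [interp1,], [interp2,], ..]
--     # [ [teacher1,], [teacher2,], ..]
--
--     if(res == "INFEASIBLE"):
--         return res
--
--     group = []
--     res = res.split('\n')
--
--     if (key == "Interpreters"):
--         idx = 0
--     else:
--         idx = 12
--
--     for r in res:
--         if len(r) == 0: continue
--
--         num = r[r.index(':', idx)+2:r.index(':', idx)+4]
--         num = num.lstrip()
--         num = int(num)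
--
--         while (len(group) < num):
--             group.append([])
--
--         temp = group[num-1]
--         temp.append(r)
--         group[num-1] = temp
--
--     group = [key for key in group if key]
--     return group
-- ===== SOURCE B (Python) =====
-- def group_results_by(res, key):
--     # Same grouping, but with a dict of buckets keyed by the parsed num
--     # instead of a positionally-indexed padded list.
--     if res == "INFEASIBLE":
--         return res
--
--     idx = 0 if key == "Interpreters" else 12
--
--     buckets = {}
--     for r in res.split('\n'):
--         if not r:
--             continue
--         i = r.index(':', idx)
--         num = int(r[i + 2:i + 4].lstrip())
--         buckets.setdefault(num, []).append(r)
--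
--     return [buckets[n] for n in sorted(buckets)]
-- ===== Notes on version B (the rewrite author's own statement) =====
-- stated objective: idiomatic
-- what changed: Replaces the while-padded positional list with group[num-1] writes and a final drop-empties pass by a dict of buckets keyed by the parsed num, emitted in sorted-key order.
-- intended difference: On inputs where some non-first line parses to num 0 (all nums nonnegative), A's group[num-1] wraparound appends the line to the bucket of the largest num seen so far, while B gives it its own bucket sorted first; B's is the intended grouping by the line's own number. — e.g. on group_results_by("a: 1 x\nb: 0 y", "Interpreters"): A returns [["a: 1 x", "b: 0 y"]], B returns [["b: 0 y"], ["a: 1 x"]]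
import Mathlib
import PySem

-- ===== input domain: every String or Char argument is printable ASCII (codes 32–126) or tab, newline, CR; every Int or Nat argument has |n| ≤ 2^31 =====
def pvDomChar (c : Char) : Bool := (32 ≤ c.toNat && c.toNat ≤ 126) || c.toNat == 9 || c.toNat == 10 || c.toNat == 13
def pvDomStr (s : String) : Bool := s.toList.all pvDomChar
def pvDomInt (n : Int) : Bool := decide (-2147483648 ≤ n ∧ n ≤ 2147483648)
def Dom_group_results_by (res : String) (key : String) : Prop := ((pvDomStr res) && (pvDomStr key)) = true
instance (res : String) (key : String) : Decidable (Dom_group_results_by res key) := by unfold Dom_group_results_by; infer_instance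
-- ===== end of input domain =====

-- B replaces A's while-padded positional list (group[num-1] writes, final drop-empties pass)
-- by a dict of buckets keyed by the parsed num, emitted in sorted-key order (idiomatic).
-- Equivalence is about the RETURN value only.

-- ===== PORT A =====
-- while (len(group) < num): group.append([])   (fuel = the exact iteration count, so the
-- loop is structural and kernel-reducible; the while condition is still tested each round)
def pvPadLoop (fuel : Nat) (g : List (List String)) (num : Int) : List (List String) :=
  match fuel with
  | 0 => g
  | f + 1 => if (g.length : Int) < num then pvPadLoop f (g ++ [[]]) num else g

def pvPad (g : List (List String)) (num : Int) : List (List String) :=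
  pvPadLoop (num - g.length).toNat g num

-- the body of A's 'for r in res:' loop (threads Option: none where A raises)
def pvStepA (idx : Int) (acc : Option (List (List String))) (r : String) :
    Option (List (List String)) :=
  match acc with
  | none => none
  | some group =>
    if PySem.Str.len r = 0 then some group
    else
      -- num = int(r[r.index(':', idx)+2 : r.index(':', idx)+4].lstrip());
      -- none where Python raises (ValueError from index() when ':' is absent
      -- from position idx on, or from int())
      match if PySem.Str.findFrom r ":" idx = -1 then none
      else
        PySem.Int.ofStr? (PySem.Str.lstrip (PySem.Str.slice r
          (some (PySem.Str.findFrom r ":" idx + 2)) (some (PySem.Str.findFrom r ":" idx + 4)))) with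
      | none => none
      | some num =>
        match PySem.List.pyGet? (pvPad group num) (num - 1) with
        | none => none
        | some temp => PySem.List.pySet? (pvPad group num) (num - 1) (temp ++ [r])

def group_results_by (res : String) (key : String) : List (List String) :=
  -- Python returns the string "INFEASIBLE" itself here (not a list of lists);
  -- that input is excluded by Pre_, the port returns [].
  if res = "INFEASIBLE" then []
  else
    let lines := (PySem.Str.split? res "\n").getD []
    let idx : Int := if key = "Interpreters" then 0 else 12
    let g := lines.foldl (pvStepA idx) (some [])
    (g.getD []).filter (fun b => !b.isEmpty)

-- ===== PORT B =====
-- the body of B's loop: buckets.setdefault(num, []).append(r)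
def pvStepB (idx : Int) (acc : Option (PySem.Dict Int (List String))) (r : String) :
    Option (PySem.Dict Int (List String)) :=
  match acc with
  | none => none
  | some d =>
    if PySem.Str.len r = 0 then some d
    else
      -- i = r.index(':', idx); num = int(r[i+2:i+4].lstrip()); none where Python raises
      match if PySem.Str.findFrom r ":" idx = -1 then none
      else
        PySem.Int.ofStr? (PySem.Str.lstrip (PySem.Str.slice r
          (some (PySem.Str.findFrom r ":" idx + 2)) (some (PySem.Str.findFrom r ":" idx + 4)))) with
      | none => none
      | some num => some (d.modify num [] (fun l => l ++ [r]))

def group_results_by_alt (res : String) (key : String) : List (List String) :=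
  if res = "INFEASIBLE" then []
  else
    let idx : Int := if key = "Interpreters" then 0 else 12
    let lines := (PySem.Str.split? res "\n").getD []
    match lines.foldl (pvStepB idx) (some PySem.Dict.empty) with
    | none => []
    | some d => (PySem.List.sorted d.keys (fun x => x)).map (fun n => d.getD n [])

-- ===== PRECONDITION & SPEC =====
-- the num a line cs yields: int(cs[cs.index(':', idx)+2 : cs.index(':', idx)+4].lstrip()),
-- none where that raises (a condition on the input, stated on the code points,
-- independently of the ports)
def pvChNum (idx : Int) (cs : List Char) : Option Int :=
  let i := PySem.Chars.findFrom cs [':'] idx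
  if 0 ≤ i then
    PySem.Int.ofChars? (PySem.Chars.lstrip ((cs.drop (i.toNat + 2)).take 2))
  else none

-- parsed nums of the non-empty lines, in order (none = that line makes A raise)
def pvNums (res : String) (key : String) : List (Option Int) :=
  ((PySem.Chars.splitOn res.toList ['\n']).filter (fun cs => !cs.isEmpty)).map
    (pvChNum (if key == "Interpreters" then 0 else 12))

-- Pre_ excludes exactly: res == "INFEASIBLE" (A returns the string itself, not a list of
-- lists), lines whose num fails to parse (ValueError from index()/int()), a zero num on the
-- first non-empty line (IndexError on group[-1] with an empty group), and lines with a
-- NEGATIVE parsed num — there A's wraparound write group[num-1] either raises IndexError or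
-- places the line by an accident of the positional list, and B's own-bucket placement is an
-- equally defensible reading of that unspecified corner.
def Pre_group_results_by (res : String) (key : String) : Prop :=
  res ≠ "INFEASIBLE" ∧ (∀ o ∈ pvNums res key, o.isSome) ∧
    ((pvNums res key).all (fun o => decide (0 ≤ o.getD 0))) = true ∧
    (pvNums res key).head? ≠ some (some 0)
instance (res : String) (key : String) : Decidable (Pre_group_results_by res key) := by
  unfold Pre_group_results_by; infer_instance

def pvWitness_group_results_by : String × String := ("a: 1 x", "Interpreters")

-- On inputs (inside Pre_) where some line's parsed num is 0, A's group[num-1] wraps around and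
-- appends the line to the bucket of the largest num seen so far, while B gives it its own
-- bucket, sorted first; B's is the intended grouping by the line's own number.
def D_group_results_by (res : String) (key : String) : Prop :=
  res ≠ "INFEASIBLE" ∧ ((pvNums res key).any (fun o => decide (o.getD 1 ≤ 0))) = true
instance (res : String) (key : String) : Decidable (D_group_results_by res key) := by
  unfold D_group_results_by; infer_instance

def Spec_group_results_by (res : String) (key : String) (out : List (List String)) : Prop :=
  ¬ D_group_results_by res key → out = group_results_by_alt res key
instance (res : String) (key : String) (out : List (List String)) :
    Decidable (Spec_group_results_by res key out) := by unfold Spec_group_results_by; infer_instance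

def pvDiffWitness_group_results_by : String × String := ("a: 1 x\nb: 0 y", "Interpreters")
def pvDiffWitnessOut_group_results_by : (List (List String)) × (List (List String)) :=
  ([["a: 1 x", "b: 0 y"]], [["b: 0 y"], ["a: 1 x"]])

-- ===== CLAIM (what is proved, stated in full; the proofs are below) =====
def Claim_unchanged_group_results_by : Prop := ∀ (res : String) (key : String), Dom_group_results_by res key → Pre_group_results_by res key → Spec_group_results_by res key (group_results_by res key)
def Claim_changed_group_results_by : Prop := Dom_group_results_by (pvDiffWitness_group_results_by.1) (pvDiffWitness_group_results_by.2) ∧ Pre_group_results_by (pvDiffWitness_group_results_by.1) (pvDiffWitness_group_results_by.2) ∧ D_group_results_by (pvDiffWitness_group_results_by.1) (pvDiffWitness_group_results_by.2) ∧ group_results_by (pvDiffWitness_group_results_by.1) (pvDiffWitness_group_results_by.2) = pvDiffWitnessOut_group_results_by.1 ∧ group_results_by_alt (pvDiffWitness_group_results_by.1) (pvDiffWitness_group_results_by.2) = pvDiffWitnessOut_group_results_by.2 ∧ pvDiffWitnessOut_group_results_by.1 ≠ pvDiffWitnessOut_group_results_by.2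

def Claim_exact_group_results_by : Prop := ∀ (res : String) (key : String), Dom_group_results_by res key → Pre_group_results_by res key → D_group_results_by res key → group_results_by res key ≠ group_results_by_alt res key

-- ===== LEMMAS AND PROOFS =====

-- the string form of pvChNum, what each port's inline parsing computes
def pvLineNum (idx : Int) (r : String) : Option Int := pvChNum idx r.toList

-- s.find never returns less than -1
theorem pvFindFrom_ge (s sub : List Char) (st : Int) : -1 ≤ PySem.Chars.findFrom s sub st := by
  simp only [PySem.Chars.findFrom]
  set st' := (if st < 0 then if st + (s.length : Int) < 0 then 0 else st + (s.length : Int) else st) with hst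
  set r := PySem.Chars.find (List.drop st'.toNat (List.take ((s.length : Int)).toNat s)) sub with hr
  have h1 : -1 ≤ r := PySem.Chars.neg_one_le_find _ _
  have h2 : 0 ≤ st' := by rw [hst]; split_ifs <;> omega
  split_ifs <;> omega

-- the ports' inline parsing is pvLineNum
theorem pvParse_eq (idx : Int) (r : String) :
    (if PySem.Str.findFrom r ":" idx = -1 then none
     else
       PySem.Int.ofStr? (PySem.Str.lstrip (PySem.Str.slice r
         (some (PySem.Str.findFrom r ":" idx + 2)) (some (PySem.Str.findFrom r ":" idx + 4))))) =
    pvLineNum idx r := by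
  unfold pvLineNum pvChNum
  have hge := pvFindFrom_ge r.toList [':'] idx
  simp only [PySem.Str.findFrom_eq, show (":" : String).toList = [':'] from rfl]
  by_cases h : PySem.Chars.findFrom r.toList [':'] idx = -1
  · rw [if_pos h, if_neg (by omega)]
  · rw [if_neg h, if_pos (by omega)]
    simp only [PySem.Int.ofStr?, PySem.Str.toList_lstrip, PySem.Str.toList_slice,
      PySem.Chars.slice_eq_listSlice]
    rw [PySem.List.slice_toNat (ha := by omega) (hb := by omega)]
    have e1 : (PySem.Chars.findFrom r.toList [':'] idx + 2).toNat
        = (PySem.Chars.findFrom r.toList [':'] idx).toNat + 2 := by omega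
    have e2 : (PySem.Chars.findFrom r.toList [':'] idx + 4).toNat
        - ((PySem.Chars.findFrom r.toList [':'] idx).toNat + 2) = 2 := by omega
    rw [e1, e2]

-- (num, line) pairs of the non-empty, parsing lines
def pvPl (idx : Int) (r : String) : Option (Int × String) :=
  if PySem.Str.len r = 0 then none else (pvLineNum idx r).map (fun n => (n, r))

-- the lines with number k, in order
def pvBuck (P : List (Int × String)) (k : Int) : List String :=
  (P.filter (fun p => decide (p.1 = k))).map (fun p => p.2)

-- max of the numbers (0 if none): the length A's group reaches
def pvL (P : List (Int × String)) : Int := P.foldl (fun m p => max m p.1) 0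

-- A's group after processing P (all nums ≥ 1)
def pvGG (P : List (Int × String)) : List (List String) :=
  (List.range (pvL P).toNat).map (fun (i : Nat) => pvBuck P ((i : Int) + 1))

-- B's dict after processing P
def pvDictOf (P : List (Int × String)) : PySem.Dict Int (List String) :=
  P.foldl (fun d p => d.modify p.1 [] (fun l => l ++ [p.2])) PySem.Dict.empty

theorem pvL_init (P : List (Int × String)) (a b : Int) (h : b ≤ a) :
    b ≤ P.foldl (fun m p => max m p.1) a := by
  induction P generalizing a with
  | nil => simpa using h
  | cons p P ih => exact ih _ (le_trans h (le_max_left _ _))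

theorem pvL_nonneg (P : List (Int × String)) : 0 ≤ pvL P := pvL_init P 0 0 le_rfl

theorem pvL_ge_aux (P : List (Int × String)) (a : Int) :
    ∀ p ∈ P, p.1 ≤ P.foldl (fun m p => max m p.1) a := by
  induction P generalizing a with
  | nil => simp
  | cons q P ih =>
    intro p hp
    rcases List.mem_cons.mp hp with h | h
    · subst h; exact pvL_init P _ _ (le_max_right _ _)
    · exact ih _ p h

theorem pvL_ge (P : List (Int × String)) : ∀ p ∈ P, p.1 ≤ pvL P := pvL_ge_aux P 0

theorem pvL_append (P : List (Int × String)) (p : Int × String) :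
    pvL (P ++ [p]) = max (pvL P) p.1 := by
  unfold pvL; rw [List.foldl_append]; rfl

theorem pvBuck_append (P : List (Int × String)) (n : Int) (r : String) (k : Int) :
    pvBuck (P ++ [(n, r)]) k = pvBuck P k ++ (if k = n then [r] else []) := by
  unfold pvBuck
  rw [List.filter_append, List.map_append]
  congr 1
  by_cases h : k = n <;> simp [h, eq_comm]

theorem pvBuck_eq_nil_of_gt (P : List (Int × String)) (k : Int) (h : pvL P < k) :
    pvBuck P k = [] := by
  unfold pvBuck
  rw [List.map_eq_nil_iff, List.filter_eq_nil_iff]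
  intro p hp hk
  have := pvL_ge P p hp
  simp at hk
  omega

theorem pvPadLoop_eq (k : Nat) (g : List (List String)) (num : Int)
    (hk : k = (num - g.length).toNat) :
    pvPadLoop k g num = g ++ List.replicate k [] := by
  induction k generalizing g with
  | zero => simp [pvPadLoop]
  | succ f ih =>
    have hlt : (g.length : Int) < num := by omega
    have : f = (num - (g ++ [[]]).length).toNat := by simp; omega
    rw [pvPadLoop, if_pos hlt, ih _ this]
    simp [List.replicate_succ]

theorem pvPad_eq (g : List (List String)) (num : Int) :
    pvPad g num = g ++ List.replicate ((num - g.length).toNat) [] := by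
  exact pvPadLoop_eq _ g num rfl

-- padding A's group for the next number n ≥ 1
theorem pvPad_GG (P : List (Int × String)) (n : Int) (hn : 1 ≤ n) :
    pvPad (pvGG P) n = (List.range (max (pvL P) n).toNat).map (fun (i : Nat) => pvBuck P ((i : Int) + 1)) := by
  have hL := pvL_nonneg P
  have hlen : (pvGG P).length = (pvL P).toNat := by
    unfold pvGG; rw [List.length_map, List.length_range]
  have hcast : (max (pvL P) n).toNat = (pvL P).toNat + (n - (pvGG P).length).toNat := by
    rw [hlen]; omega
  rw [pvPad_eq, hcast, List.range_add, List.map_append, List.map_map]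
  congr 1
  rw [eq_comm, List.eq_replicate_iff]
  constructor
  · rw [List.length_map, List.length_range]
  · intro b hb
    rw [List.mem_map] at hb
    obtain ⟨j, hj, rfl⟩ := hb
    simp only [Function.comp]
    apply pvBuck_eq_nil_of_gt
    push_cast
    omega

theorem pvStepA_GG (idx : Int) (P : List (Int × String)) (n : Int) (r : String)
    (hn : 1 ≤ n) (hr : PySem.Str.len r ≠ 0) (hparse : pvLineNum idx r = some n) :
    pvStepA idx (some (pvGG P)) r = some (pvGG (P ++ [(n, r)])) := by
  have hL := pvL_nonneg P
  have hn1 : n - 1 = ((n.toNat - 1 : Nat) : Int) := by omega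
  have hlt : n.toNat - 1 < ((List.range (max (pvL P) n).toNat).map
      (fun (i : Nat) => pvBuck P ((i : Int) + 1))).length := by
    rw [List.length_map, List.length_range]; omega
  simp only [pvStepA]
  rw [if_neg hr, pvParse_eq, hparse]
  have hge : ((n.toNat - 1 : Nat) : Int) + 1 = n := by omega
  have hget : PySem.List.pyGet? ((List.range (max (pvL P) n).toNat).map
      (fun (i : Nat) => pvBuck P ((i : Int) + 1))) (n - 1) = some (pvBuck P n) := by
    rw [hn1, PySem.List.pyGet?_natCast, List.getElem?_eq_getElem hlt]
    rw [List.getElem_map, List.getElem_range, hge]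
  show (match PySem.List.pyGet? (pvPad (pvGG P) n) (n - 1) with
    | none => none
    | some temp => PySem.List.pySet? (pvPad (pvGG P) n) (n - 1) (temp ++ [r])) =
      some (pvGG (P ++ [(n, r)]))
  rw [pvPad_GG P n hn, hget]
  show PySem.List.pySet? ((List.range (max (pvL P) n).toNat).map
      (fun (i : Nat) => pvBuck P ((i : Int) + 1))) (n - 1) (pvBuck P n ++ [r]) =
    some (pvGG (P ++ [(n, r)]))
  rw [hn1, PySem.List.pySet?_natCast _ _ _ hlt]
  congr 1
  have hLapp : pvL (P ++ [(n, r)]) = max (pvL P) n := pvL_append P (n, r)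
  apply List.ext_getElem
  · rw [List.length_set, List.length_map, List.length_range]
    unfold pvGG
    rw [List.length_map, List.length_range, hLapp]
  · intro j hj1 hj2
    rw [List.getElem_set]
    unfold pvGG
    conv_rhs => rw [List.getElem_map, List.getElem_range]
    rw [pvBuck_append]
    by_cases hcase : n.toNat - 1 = j
    · have he : ((j : Nat) : Int) + 1 = n := by omega
      rw [if_pos hcase, if_pos he, he]
    · have he : ¬ (((j : Nat) : Int) + 1 = n) := by omega
      rw [if_neg hcase, if_neg he, List.append_nil]
      rw [List.getElem_map, List.getElem_range]

theorem pvFoldA (idx : Int) (lines : List String) (P : List (Int × String))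
    (hall : ∀ r ∈ lines, PySem.Str.len r ≠ 0 → ∃ n, pvLineNum idx r = some n ∧ 1 ≤ n) :
    lines.foldl (pvStepA idx) (some (pvGG P)) =
      some (pvGG (P ++ lines.filterMap (pvPl idx))) := by
  induction lines generalizing P with
  | nil => simp
  | cons r rest ih =>
    rw [List.foldl_cons, List.filterMap_cons]
    by_cases h0 : PySem.Str.len r = 0
    · have hs : pvStepA idx (some (pvGG P)) r = some (pvGG P) := by
        simp only [pvStepA]; rw [if_pos h0]
      have hp : pvPl idx r = none := by unfold pvPl; rw [if_pos h0]
      rw [hs, hp]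
      exact ih P (fun r' hr' => hall r' (List.mem_cons_of_mem _ hr'))
    · obtain ⟨n, hparse, hn⟩ := hall r (List.mem_cons_self) h0
      have hp : pvPl idx r = some (n, r) := by
        unfold pvPl; rw [if_neg h0, hparse]; rfl
      rw [pvStepA_GG idx P n r hn h0 hparse, hp]
      rw [ih (P ++ [(n, r)]) (fun r' hr' => hall r' (List.mem_cons_of_mem _ hr'))]
      rw [List.append_assoc]
      rfl

theorem pvFoldB (idx : Int) (lines : List String) (P : List (Int × String))
    (hall : ∀ r ∈ lines, PySem.Str.len r ≠ 0 → (pvLineNum idx r).isSome) :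
    lines.foldl (pvStepB idx) (some (pvDictOf P)) =
      some (pvDictOf (P ++ lines.filterMap (pvPl idx))) := by
  induction lines generalizing P with
  | nil => simp
  | cons r rest ih =>
    rw [List.foldl_cons, List.filterMap_cons]
    by_cases h0 : PySem.Str.len r = 0
    · have hs : pvStepB idx (some (pvDictOf P)) r = some (pvDictOf P) := by
        simp only [pvStepB]; rw [if_pos h0]
      have hp : pvPl idx r = none := by unfold pvPl; rw [if_pos h0]
      rw [hs, hp]
      exact ih P (fun r' hr' => hall r' (List.mem_cons_of_mem _ hr'))
    · obtain ⟨n, hparse⟩ := Option.isSome_iff_exists.mp (hall r (List.mem_cons_self) h0)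
      have hp : pvPl idx r = some (n, r) := by
        unfold pvPl; rw [if_neg h0, hparse]; rfl
      have hs : pvStepB idx (some (pvDictOf P)) r =
          some ((pvDictOf P).modify n [] (fun l => l ++ [r])) := by
        simp only [pvStepB]; rw [if_neg h0, pvParse_eq, hparse]
      have hd : (pvDictOf P).modify n [] (fun l => l ++ [r]) = pvDictOf (P ++ [(n, r)]) := by
        unfold pvDictOf; rw [List.foldl_append]; rfl
      rw [hs, hp, hd]
      rw [ih (P ++ [(n, r)]) (fun r' hr' => hall r' (List.mem_cons_of_mem _ hr'))]
      rw [List.append_assoc]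
      rfl

theorem pvDictOf_keys (P : List (Int × String)) :
    (pvDictOf P).keys = PySem.List.dedup (P.map (fun p => p.1)) := by
  induction P using List.reverseRecOn with
  | nil => simp [pvDictOf, PySem.List.dedup]
  | append_singleton P p ih =>
    have hd : pvDictOf (P ++ [p]) = (pvDictOf P).modify p.1 [] (fun l => l ++ [p.2]) := by
      unfold pvDictOf; rw [List.foldl_append]; rfl
    rw [hd, PySem.Dict.keys_modify, List.map_append, List.map_cons, List.map_nil,
      PySem.List.dedup_eq_ofList, PySem.Set.ofList_append_singleton, PySem.Set.add_eq_ite, ← PySem.List.dedup_eq_ofList, ← ih]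
    by_cases hc : (pvDictOf P).contains p.1 = true
    · rw [PySem.Dict.keys_insert_of_contains _ _ hc,
        if_pos ((PySem.Dict.contains_iff_mem_keys _ _).mp hc)]
    · rw [PySem.Dict.keys_insert_of_not_contains _ _ (by simpa using hc),
        if_neg (fun hm => hc ((PySem.Dict.contains_iff_mem_keys _ _).mpr hm))]

theorem pvDictOf_getD (P : List (Int × String)) (k : Int) :
    (pvDictOf P).getD k [] = pvBuck P k := by
  induction P using List.reverseRecOn with
  | nil => simp [pvDictOf, pvBuck]
  | append_singleton P p ih =>
    have hd : pvDictOf (P ++ [p]) = (pvDictOf P).modify p.1 [] (fun l => l ++ [p.2]) := by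
      unfold pvDictOf; rw [List.foldl_append]; rfl
    rw [hd, PySem.Dict.getD_modify, pvBuck_append P p.1 p.2 k, ih]
    by_cases hc : k = p.1
    · subst hc; simp [ih]
    · simp [hc]

-- the final shapes agree: drop-empties over A's positional group
-- = B's buckets in sorted-key order
theorem pvFinal (P : List (Int × String)) (hP : ∀ p ∈ P, 1 ≤ p.1) :
    (pvGG P).filter (fun b => !b.isEmpty) =
      (PySem.List.sorted (PySem.List.dedup (P.map (fun p => p.1))) (fun x => x)).map
        (fun k => pvBuck P k) := by
  have hL := pvL_nonneg P
  have hbuckNe : ∀ k : Int, pvBuck P k ≠ [] ↔ ∃ p ∈ P, p.1 = k := by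
    intro k
    unfold pvBuck
    rw [Ne, List.map_eq_nil_iff, List.filter_eq_nil_iff]
    push Not
    simp
  have hpair0 : (((List.range (pvL P).toNat).filter
        (fun (i : Nat) => !(pvBuck P ((i : Int) + 1)).isEmpty)).map
        (fun (i : Nat) => (i : Int) + 1)).Pairwise (fun a b => a < b) :=
    List.Pairwise.map _ (fun a b (h : a < b) => by omega)
      (List.Pairwise.filter _ List.pairwise_lt_range)
  have hnodupks : (((List.range (pvL P).toNat).filter
        (fun (i : Nat) => !(pvBuck P ((i : Int) + 1)).isEmpty)).map
        (fun (i : Nat) => (i : Int) + 1)).Nodup :=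
    hpair0.imp (fun h => ne_of_lt h)
  have hmemks : ∀ k : Int, k ∈ ((List.range (pvL P).toNat).filter
        (fun (i : Nat) => !(pvBuck P ((i : Int) + 1)).isEmpty)).map
        (fun (i : Nat) => (i : Int) + 1) ↔
      k ∈ PySem.List.dedup (P.map (fun p => p.1)) := by
    intro k
    rw [PySem.List.mem_dedup, List.mem_map]
    simp only [List.mem_map, List.mem_filter, List.mem_range, Bool.not_eq_eq_eq_not,
      Bool.not_true, List.isEmpty_eq_false_iff]
    constructor
    · rintro ⟨i, ⟨hi, hne⟩, rfl⟩
      exact (hbuckNe _).mp hne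
    · rintro ⟨p, hp, rfl⟩
      have h1 := hP p hp
      have h2 := pvL_ge P p hp
      refine ⟨(p.1 - 1).toNat, ⟨by omega, ?_⟩, by omega⟩
      have hcast : ((((p.1 - 1).toNat : Nat)) : Int) + 1 = p.1 := by omega
      rw [hcast]
      exact (hbuckNe _).mpr ⟨p, hp, rfl⟩
  have hperm := (List.perm_ext_iff_of_nodup hnodupks
    (PySem.List.nodup_dedup (P.map (fun p => p.1)))).mpr hmemks
  rw [PySem.List.sorted_eq_of_perm_of_pairwise_lt _ _ _ hperm hpair0]
  unfold pvGG
  rw [List.filter_map, List.map_map]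
  rfl

-- a nonzero max is attained by some pair
theorem pvL_attained (P : List (Int × String)) (h : 1 ≤ pvL P) : ∃ p ∈ P, p.1 = pvL P := by
  induction P using List.reverseRecOn with
  | nil => simp [pvL] at h
  | append_singleton P p ih =>
    rw [pvL_append] at h ⊢
    by_cases hc : pvL P ≤ p.1
    · exact ⟨p, by simp, by rw [max_eq_right hc]⟩
    · obtain ⟨q, hq, hqe⟩ := ih (by omega)
      exact ⟨q, by simp [hq], by rw [max_eq_left (by omega)]; exact hqe⟩

theorem pvBuck_ne_nil_iff (P : List (Int × String)) (k : Int) :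
    pvBuck P k ≠ [] ↔ ∃ p ∈ P, p.1 = k := by
  unfold pvBuck
  rw [Ne, List.map_eq_nil_iff, List.filter_eq_nil_iff]
  push Not
  simp

-- group[-1] on a non-empty list
theorem pvGet_neg_one {α : Type} (xs : List α) (h : 0 < xs.length) :
    PySem.List.pyGet? xs (-1) = some (xs[xs.length - 1]'(by omega)) := by
  simp only [PySem.List.pyGet?, PySem.List.pyIdx?]
  rw [if_neg (by omega), if_pos (by omega : -(xs.length : Int) ≤ -1)]
  show xs[xs.length - (1 : Int).toNat]? = _
  rw [List.getElem?_eq_getElem (by omega)]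
  rfl

theorem pvSet_neg_one {α : Type} (xs : List α) (v : α) (h : 0 < xs.length) :
    PySem.List.pySet? xs (-1) v = some (xs.set (xs.length - 1) v) := by
  simp only [PySem.List.pySet?, PySem.List.pyIdx?]
  rw [if_neg (by omega), if_pos (by omega : -(xs.length : Int) ≤ -1)]
  rfl

-- the loop invariant for A's group under nonnegative nums: its length is the running max,
-- and a slot is empty exactly when no line with that (positive) num has been seen
def pvInv (pf : List (Int × String)) (g : List (List String)) : Prop :=
  g.length = (pvL pf).toNat ∧
  ∀ i : Nat, (hi : i < g.length) → (g[i] = [] ↔ pvBuck pf ((i : Int) + 1) = [])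

theorem pvStepA_inv_pos (idx : Int) (pf : List (Int × String)) (g : List (List String))
    (n : Int) (r : String) (hn : 1 ≤ n) (hr : PySem.Str.len r ≠ 0)
    (hp : pvLineNum idx r = some n) (hinv : pvInv pf g) :
    ∃ g', pvStepA idx (some g) r = some g' ∧ pvInv (pf ++ [(n, r)]) g' := by
  obtain ⟨hlen, hiff⟩ := hinv
  have hL := pvL_nonneg pf
  have hplen : (pvPad g n).length = max g.length n.toNat := by
    rw [pvPad_eq]; simp; omega
  have hi1 : n.toNat - 1 < (pvPad g n).length := by omega
  have hn1 : n - 1 = ((n.toNat - 1 : Nat) : Int) := by omega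
  refine ⟨(pvPad g n).set (n.toNat - 1) ((pvPad g n)[n.toNat - 1] ++ [r]), ?_, ?_, ?_⟩
  · simp only [pvStepA]
    rw [if_neg hr, pvParse_eq, hp]
    show (match PySem.List.pyGet? (pvPad g n) (n - 1) with
      | none => none
      | some temp => PySem.List.pySet? (pvPad g n) (n - 1) (temp ++ [r])) = _
    rw [hn1, PySem.List.pyGet?_natCast, List.getElem?_eq_getElem hi1]
    show PySem.List.pySet? (pvPad g n) ((n.toNat - 1 : Nat) : Int) _ = _
    rw [PySem.List.pySet?_natCast _ _ _ hi1]
  · rw [List.length_set, hplen, pvL_append, hlen]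
    omega
  · intro i hi
    rw [List.length_set, hplen] at hi
    rw [List.getElem_set, pvBuck_append]
    by_cases hc : n.toNat - 1 = i
    · rw [if_pos hc, if_pos (by omega : ((i : Nat) : Int) + 1 = n)]
      constructor
      · intro hx; exact absurd hx (by simp)
      · intro hx; exact absurd hx (by simp [pvBuck])
    · rw [if_neg hc, if_neg (by omega : ¬ ((i : Nat) : Int) + 1 = n), List.append_nil]
      simp only [pvPad_eq]
      by_cases hig : i < g.length
      · rw [List.getElem_append_left hig]
        exact hiff i hig
      · rw [List.getElem_append_right (by omega)]
        rw [List.getElem_replicate]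
        constructor
        · intro _
          apply pvBuck_eq_nil_of_gt
          omega
        · intro _; rfl

theorem pvStepA_inv_zero (idx : Int) (pf : List (Int × String)) (g : List (List String))
    (r : String) (hr : PySem.Str.len r ≠ 0) (hp : pvLineNum idx r = some 0)
    (hL1 : 1 ≤ pvL pf) (hinv : pvInv pf g) :
    ∃ g', pvStepA idx (some g) r = some g' ∧ pvInv (pf ++ [(0, r)]) g' := by
  obtain ⟨hlen, hiff⟩ := hinv
  have hg1 : 0 < g.length := by omega
  have hpad : pvPad g 0 = g := by rw [pvPad_eq]; simp
  have hbmax : pvBuck pf (pvL pf) ≠ [] := by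
    rw [pvBuck_ne_nil_iff]
    exact pvL_attained pf hL1
  refine ⟨g.set (g.length - 1) (g[g.length - 1]'(by omega) ++ [r]), ?_, ?_, ?_⟩
  · simp only [pvStepA]
    rw [if_neg hr, pvParse_eq, hp]
    show (match PySem.List.pyGet? (pvPad g 0) (0 - 1) with
      | none => none
      | some temp => PySem.List.pySet? (pvPad g 0) (0 - 1) (temp ++ [r])) = _
    rw [hpad, show (0 - 1 : Int) = -1 from rfl, pvGet_neg_one g hg1]
    show PySem.List.pySet? g (-1) _ = _
    rw [pvSet_neg_one g _ hg1]
  · rw [List.length_set, pvL_append, hlen]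
    have : max (pvL pf) ((0, r) : Int × String).1 = pvL pf := by
      rw [max_eq_left (by omega)]
    rw [this]
  · intro i hi
    rw [List.length_set] at hi
    rw [List.getElem_set, pvBuck_append]
    rw [if_neg (by omega : ¬ ((i : Nat) : Int) + 1 = 0), List.append_nil]
    by_cases hc : g.length - 1 = i
    · rw [if_pos hc]
      constructor
      · intro hx; exact absurd hx (by simp)
      · intro hx
        exfalso
        apply hbmax
        have : ((i : Nat) : Int) + 1 = pvL pf := by omega
        rw [← this]
        exact hx
    · rw [if_neg hc]
      exact hiff i hi

theorem pvFoldA0 (idx : Int) (lines : List String) (pf : List (Int × String))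
    (g : List (List String)) (hinv : pvInv pf g)
    (hall : ∀ r ∈ lines, PySem.Str.len r ≠ 0 → ∃ n, pvLineNum idx r = some n ∧ 0 ≤ n)
    (hz : ∀ l1 r l2, lines = l1 ++ r :: l2 → PySem.Str.len r ≠ 0 → pvLineNum idx r = some 0 →
      1 ≤ pvL (pf ++ l1.filterMap (pvPl idx))) :
    ∃ g', lines.foldl (pvStepA idx) (some g) = some g' ∧
      pvInv (pf ++ lines.filterMap (pvPl idx)) g' := by
  induction lines generalizing pf g with
  | nil => exact ⟨g, rfl, by simpa using hinv⟩
  | cons r rest ih =>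
    rw [List.foldl_cons, List.filterMap_cons]
    by_cases h0 : PySem.Str.len r = 0
    · have hs : pvStepA idx (some g) r = some g := by
        simp only [pvStepA]; rw [if_pos h0]
      have hpr : pvPl idx r = none := by unfold pvPl; rw [if_pos h0]
      rw [hs, hpr]
      exact ih pf g hinv (fun r' hr' => hall r' (List.mem_cons_of_mem _ hr'))
        (fun l1 r' l2 he hr' hp' => by
          have := hz (r :: l1) r' l2 (by rw [he]; rfl) hr' hp'
          rwa [List.filterMap_cons, hpr] at this)
    · obtain ⟨n, hpn, hn0⟩ := hall r (List.mem_cons_self) h0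
      have hpr : pvPl idx r = some (n, r) := by
        unfold pvPl; rw [if_neg h0, hpn]; rfl
      rw [hpr]
      by_cases hzn : n = 0
      · subst hzn
        have hL1 : 1 ≤ pvL pf := by
          have := hz [] r rest rfl h0 hpn
          simpa using this
        obtain ⟨g1, hg1, hinv1⟩ := pvStepA_inv_zero idx pf g r h0 hpn hL1 hinv
        rw [hg1]
        obtain ⟨g', hg', hinv'⟩ := ih (pf ++ [(0, r)]) g1 hinv1
          (fun r' hr' => hall r' (List.mem_cons_of_mem _ hr'))
          (fun l1 r' l2 he hr' hp' => by
            have := hz (r :: l1) r' l2 (by rw [he]; rfl) hr' hp'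
            rw [List.filterMap_cons, hpr] at this
            simpa [List.append_assoc] using this)
        refine ⟨g', hg', ?_⟩
        rw [List.append_assoc] at hinv'
        exact hinv'
      · have hn1 : 1 ≤ n := by omega
        obtain ⟨g1, hg1, hinv1⟩ := pvStepA_inv_pos idx pf g n r hn1 h0 hpn hinv
        rw [hg1]
        obtain ⟨g', hg', hinv'⟩ := ih (pf ++ [(n, r)]) g1 hinv1
          (fun r' hr' => hall r' (List.mem_cons_of_mem _ hr'))
          (fun l1 r' l2 he hr' hp' => by
            have := hz (r :: l1) r' l2 (by rw [he]; rfl) hr' hp'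
            rw [List.filterMap_cons, hpr] at this
            simpa [List.append_assoc] using this)
        refine ⟨g', hg', ?_⟩
        rw [List.append_assoc] at hinv'
        exact hinv'

-- pvNums (stated on code points) is the per-line parse over the string lines
theorem pvNums_eq (res key : String) :
    pvNums res key = (((PySem.Str.split? res "\n").getD []).filter
      (fun r => !(PySem.Str.len r == 0))).map
      (pvLineNum (if key = "Interpreters" then 0 else 12)) := by
  unfold pvNums
  rw [show (if key == "Interpreters" then (0 : Int) else 12)
      = (if key = "Interpreters" then 0 else 12) by
    by_cases h : key = "Interpreters" <;> simp [h]]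
  have hsplit : ((PySem.Str.split? res "\n").getD []).map String.toList
      = PySem.Chars.splitOn res.toList ['\n'] := by
    have h : ((PySem.Str.split? res "\n").map (List.map String.toList))
        = some (PySem.Chars.splitOn res.toList ['\n']) := by
      rw [PySem.Str.split?_map]; rfl
    obtain ⟨l, hl, hmap⟩ := Option.map_eq_some_iff.mp h
    rw [hl]
    simpa using hmap
  rw [← hsplit, List.filter_map, List.map_map]
  have hpred : ∀ x ∈ (PySem.Str.split? res "\n").getD [],
      ((fun cs => !List.isEmpty cs) ∘ String.toList) x = (!(PySem.Str.len x == 0)) := by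
    intro x _
    cases h : x.toList
    · simp [h]
    · simp [h, PySem.Str.len_eq]
      omega
  rw [List.filter_congr hpred]
  rfl

theorem pvHz (res key : String)
    (hsome : ∀ o ∈ pvNums res key, o.isSome)
    (hnonneg : ((pvNums res key).all (fun o => decide (0 ≤ o.getD 0))) = true)
    (hhead : (pvNums res key).head? ≠ some (some 0)) :
    ∀ l1 r l2, (PySem.Str.split? res "\n").getD [] = l1 ++ r :: l2 →
      PySem.Str.len r ≠ 0 → pvLineNum (if key = "Interpreters" then 0 else 12) r = some 0 →
      1 ≤ pvL (([] : List (Int × String)) ++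
        l1.filterMap (pvPl (if key = "Interpreters" then 0 else 12))) := by
  intro l1 r l2 heq h0 hp0
  rw [List.nil_append]
  rw [pvNums_eq, heq, List.filter_append,
    List.filter_cons_of_pos (by simpa using h0)] at hsome hnonneg hhead
  cases hc : l1.filter (fun r => !(PySem.Str.len r == 0)) with
  | nil =>
    rw [hc] at hhead
    simp [hp0] at hhead
  | cons f t =>
    rw [hc] at hsome hnonneg hhead
    have hfm : pvLineNum (if key = "Interpreters" then 0 else 12) f ∈
        ((f :: t) ++ r :: l2.filter (fun r => !(PySem.Str.len r == 0))).map
          (pvLineNum (if key = "Interpreters" then 0 else 12)) :=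
      List.mem_map_of_mem (by simp)
    obtain ⟨m, hm⟩ := Option.isSome_iff_exists.mp (hsome _ hfm)
    have hmn : 0 ≤ m := by
      have := List.all_eq_true.mp hnonneg _ hfm
      rw [hm] at this
      simpa using this
    have hm0 : m ≠ 0 := by
      intro hmz
      apply hhead
      rw [List.cons_append, List.map_cons, List.head?_cons, hm, hmz]
    have hf1 : f ∈ l1 ∧ PySem.Str.len f ≠ 0 := by
      have : f ∈ l1.filter (fun r => !(PySem.Str.len r == 0)) := by rw [hc]; simp
      rw [List.mem_filter] at this
      exact ⟨this.1, by simpa using this.2⟩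
    have hmem : (m, f) ∈ l1.filterMap (pvPl (if key = "Interpreters" then 0 else 12)) := by
      refine List.mem_filterMap.mpr ⟨f, hf1.1, ?_⟩
      unfold pvPl
      rw [if_neg hf1.2, hm]
      rfl
    have := pvL_ge _ _ hmem
    simp at this
    omega

-- ===== VERDICT (by name: the statement is the Claim_ definition above) =====
theorem group_results_by_spec : Claim_unchanged_group_results_by := by
  intro res key hdom hpre hD
  obtain ⟨hinf, hsome, hnonneg, hhead⟩ := hpre
  have hany : ((pvNums res key).any (fun o => decide (o.getD 1 ≤ 0))) = false := by
    by_contra h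
    exact hD ⟨hinf, by simpa using h⟩
  -- every non-empty line parses to a positive num
  have hall : ∀ r ∈ (PySem.Str.split? res "\n").getD [],
      PySem.Str.len r ≠ 0 →
      ∃ n, pvLineNum (if key = "Interpreters" then 0 else 12) r = some n ∧ 1 ≤ n := by
    intro r hr h0
    have hsplit : ((PySem.Str.split? res "\n").getD []).map String.toList
        = PySem.Chars.splitOn res.toList ['\n'] := by
      have h : ((PySem.Str.split? res "\n").map (List.map String.toList))
          = some (PySem.Chars.splitOn res.toList ['\n']) := by
        rw [PySem.Str.split?_map]; rfl
      obtain ⟨l, hl, hmap⟩ := Option.map_eq_some_iff.mp h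
      rw [hl]
      simpa using hmap
    have hne : r.toList ≠ [] := by
      intro hx
      apply h0
      rw [PySem.Str.len_eq, hx]
      rfl
    have hmem : pvLineNum (if key = "Interpreters" then 0 else 12) r ∈ pvNums res key := by
      unfold pvNums
      rw [show (if key == "Interpreters" then (0 : Int) else 12)
          = (if key = "Interpreters" then 0 else 12) by
        by_cases h : key = "Interpreters" <;> simp [h]]
      refine List.mem_map.mpr ⟨r.toList, List.mem_filter.mpr ⟨?_, by simpa using hne⟩, rfl⟩
      rw [← hsplit]
      exact List.mem_map_of_mem hr
    obtain ⟨n, hn⟩ := Option.isSome_iff_exists.mp (hsome _ hmem)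
    refine ⟨n, hn, ?_⟩
    have := List.any_eq_false.mp hany _ hmem
    rw [hn] at this
    simp at this
    omega
  have hP : ∀ p ∈ ((PySem.Str.split? res "\n").getD []).filterMap
      (pvPl (if key = "Interpreters" then 0 else 12)), 1 ≤ p.1 := by
    intro p hp
    obtain ⟨r, hr, hpr⟩ := List.mem_filterMap.mp hp
    unfold pvPl at hpr
    by_cases h0 : PySem.Str.len r = 0
    · rw [if_pos h0] at hpr; exact absurd hpr (by simp)
    · rw [if_neg h0] at hpr
      obtain ⟨n, hn, h1⟩ := hall r hr h0
      rw [hn] at hpr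
      simp only [Option.map_some, Option.some.injEq] at hpr
      rw [← hpr]
      exact h1
  have hA : group_results_by res key =
      (pvGG (((PySem.Str.split? res "\n").getD []).filterMap
        (pvPl (if key = "Interpreters" then 0 else 12)))).filter (fun b => !b.isEmpty) := by
    unfold group_results_by
    rw [if_neg hinf]
    show ((((PySem.Str.split? res "\n").getD []).foldl
        (pvStepA (if key = "Interpreters" then 0 else 12)) (some (pvGG []))).getD []).filter
          (fun b => !b.isEmpty) = _
    rw [pvFoldA _ _ [] hall, List.nil_append]
    rfl
  have hB : group_results_by_alt res key =
      (PySem.List.sorted ((pvDictOf (((PySem.Str.split? res "\n").getD []).filterMap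
          (pvPl (if key = "Interpreters" then 0 else 12)))).keys) (fun x => x)).map
        (fun n => (pvDictOf (((PySem.Str.split? res "\n").getD []).filterMap
          (pvPl (if key = "Interpreters" then 0 else 12)))).getD n []) := by
    unfold group_results_by_alt
    rw [if_neg hinf]
    show (match ((PySem.Str.split? res "\n").getD []).foldl
        (pvStepB (if key = "Interpreters" then 0 else 12)) (some (pvDictOf [])) with
      | none => []
      | some d => (PySem.List.sorted d.keys (fun x => x)).map (fun n => d.getD n [])) = _
    rw [pvFoldB _ _ [] (fun r hr h0 => (hall r hr h0).elim (fun n hn => by rw [hn.1]; rfl)),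
      List.nil_append]
  rw [hA, hB, pvDictOf_keys]
  have hgetD : (fun n => (pvDictOf (((PySem.Str.split? res "\n").getD []).filterMap
      (pvPl (if key = "Interpreters" then 0 else 12)))).getD n []) =
      (fun k => pvBuck (((PySem.Str.split? res "\n").getD []).filterMap
        (pvPl (if key = "Interpreters" then 0 else 12))) k) := by
    funext n
    exact pvDictOf_getD _ n
  rw [hgetD]
  exact pvFinal _ hP

theorem group_results_by_changed : Claim_changed_group_results_by := by
  unfold Claim_changed_group_results_by; decide

theorem group_results_by_tight : Claim_exact_group_results_by := by
  intro res key hdom hpre hD heq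
  obtain ⟨hinf, hsome, hnonneg, hhead⟩ := hpre
  -- every non-empty line parses to some n ≥ 0
  have hall : ∀ r ∈ (PySem.Str.split? res "\n").getD [],
      PySem.Str.len r ≠ 0 →
      ∃ n, pvLineNum (if key = "Interpreters" then 0 else 12) r = some n ∧ 0 ≤ n := by
    intro r hr h0
    have hmem : pvLineNum (if key = "Interpreters" then 0 else 12) r ∈ pvNums res key := by
      rw [pvNums_eq]
      exact List.mem_map_of_mem (List.mem_filter.mpr ⟨hr, by simpa using h0⟩)
    obtain ⟨n, hn⟩ := Option.isSome_iff_exists.mp (hsome _ hmem)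
    refine ⟨n, hn, ?_⟩
    have := List.all_eq_true.mp hnonneg _ hmem
    rw [hn] at this
    simpa using this
  -- all pairs have nonneg num
  have hPnn : ∀ p ∈ ((PySem.Str.split? res "\n").getD []).filterMap
      (pvPl (if key = "Interpreters" then 0 else 12)), 0 ≤ p.1 := by
    intro p hp
    obtain ⟨r, hr, hpr⟩ := List.mem_filterMap.mp hp
    unfold pvPl at hpr
    by_cases h0 : PySem.Str.len r = 0
    · rw [if_pos h0] at hpr; exact absurd hpr (by simp)
    · rw [if_neg h0] at hpr
      obtain ⟨n, hn, h1⟩ := hall r hr h0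
      rw [hn] at hpr
      simp only [Option.map_some, Option.some.injEq] at hpr
      rw [← hpr]
      exact h1
  -- a zero pair exists (from D_)
  have hzero : (∃ f, (0, f) ∈ ((PySem.Str.split? res "\n").getD []).filterMap
      (pvPl (if key = "Interpreters" then 0 else 12))) := by
    obtain ⟨o, ho, hole⟩ := List.any_eq_true.mp hD.2
    rw [pvNums_eq] at ho
    obtain ⟨f, hf, hfo⟩ := List.mem_map.mp ho
    rw [List.mem_filter] at hf
    obtain ⟨n, hn⟩ := Option.isSome_iff_exists.mp
      (hsome _ (by rw [pvNums_eq]; exact List.mem_map_of_mem (List.mem_filter.mpr hf)))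
    have hn0 : n = 0 := by
      have h1 : 0 ≤ n := by
        have := List.all_eq_true.mp hnonneg _
          (by rw [pvNums_eq]; exact List.mem_map_of_mem (List.mem_filter.mpr hf))
        rw [hn] at this
        simpa using this
      rw [← hfo, hn] at hole
      simp at hole
      omega
    refine ⟨f, List.mem_filterMap.mpr ⟨f, hf.1, ?_⟩⟩
    unfold pvPl
    rw [if_neg (by simpa using hf.2), hn, hn0]
    rfl
  -- run A via the invariant
  obtain ⟨g', hgf, hinv'⟩ := pvFoldA0 (if key = "Interpreters" then 0 else 12)
    ((PySem.Str.split? res "\n").getD []) [] []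
    ⟨rfl, fun i hi => absurd hi (by simp)⟩
    hall (pvHz res key hsome hnonneg hhead)
  rw [List.nil_append] at hinv'
  have hA : group_results_by res key =
      g'.filter (fun b => !b.isEmpty) := by
    unfold group_results_by
    rw [if_neg hinf]
    show ((((PySem.Str.split? res "\n").getD []).foldl
        (pvStepA (if key = "Interpreters" then 0 else 12)) (some [])).getD []).filter
          (fun b => !b.isEmpty) = _
    rw [hgf]
    rfl
  -- B in closed form
  have hB : group_results_by_alt res key =
      (PySem.List.sorted (PySem.List.dedup ((((PySem.Str.split? res "\n").getD []).filterMap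
          (pvPl (if key = "Interpreters" then 0 else 12))).map (fun p => p.1))) (fun x => x)).map
        (fun k => pvBuck (((PySem.Str.split? res "\n").getD []).filterMap
          (pvPl (if key = "Interpreters" then 0 else 12))) k) := by
    unfold group_results_by_alt
    rw [if_neg hinf]
    show (match ((PySem.Str.split? res "\n").getD []).foldl
        (pvStepB (if key = "Interpreters" then 0 else 12)) (some (pvDictOf [])) with
      | none => []
      | some d => (PySem.List.sorted d.keys (fun x => x)).map (fun n => d.getD n [])) = _
    rw [pvFoldB _ _ [] (fun r hr h0 => (hall r hr h0).elim (fun n hn => by rw [hn.1]; rfl)),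
      List.nil_append]
    show (PySem.List.sorted (pvDictOf _).keys (fun x => x)).map _ = _
    rw [pvDictOf_keys]
    congr 1
    funext n
    exact pvDictOf_getD _ n
  -- compare lengths
  set P := ((PySem.Str.split? res "\n").getD []).filterMap
    (pvPl (if key = "Interpreters" then 0 else 12)) with hPdef
  have hmapE : g'.map (fun b => b.isEmpty)
      = (List.range (pvL P).toNat).map (fun (i : Nat) => (pvBuck P ((i : Int) + 1)).isEmpty) := by
    apply List.ext_getElem
    · simp [hinv'.1]
    · intro j h1 h2
      rw [List.length_map] at h1
      simp only [List.getElem_map, List.getElem_range]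
      have hiffj := hinv'.2 j h1
      by_cases hb : g'[j] = []
      · rw [hb, hiffj.mp hb]
      · rw [List.isEmpty_eq_false_iff.mpr hb,
          List.isEmpty_eq_false_iff.mpr (fun h => hb (hiffj.mpr h))]
  have hlenA : (g'.filter (fun b => !b.isEmpty)).length
      = (List.range (pvL P).toNat).countP (fun (i : Nat) => !(pvBuck P ((i : Int) + 1)).isEmpty) := by
    rw [← List.countP_eq_length_filter]
    have h1 : g'.countP (fun b => !b.isEmpty)
        = (g'.map (fun b => b.isEmpty)).countP (fun x => !x) := by
      rw [List.countP_map]; rfl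
    rw [h1, hmapE, List.countP_map]
    rfl
  -- the distinct keys: 0 plus the distinct positive nums
  have hnodupS := PySem.List.nodup_dedup (P.map (fun p => p.1))
  have h0S : (0 : Int) ∈ PySem.List.dedup (P.map (fun p => p.1)) := by
    rw [PySem.List.mem_dedup]
    obtain ⟨f, hf⟩ := hzero
    exact List.mem_map.mpr ⟨(0, f), hf, rfl⟩
  have hone : ((PySem.List.dedup (P.map (fun p => p.1))).filter (fun k => k == 0)).length = 1 := by
    rw [← List.count_eq_length_filter]
    have hle := List.nodup_iff_count_le_one.mp hnodupS 0
    have hge := List.count_pos_iff.mpr h0S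
    omega
  have hpair0 : (((List.range (pvL P).toNat).filter
        (fun (i : Nat) => !(pvBuck P ((i : Int) + 1)).isEmpty)).map
        (fun (i : Nat) => (i : Int) + 1)).Pairwise (fun a b => a < b) :=
    List.Pairwise.map _ (fun a b (h : a < b) => by omega)
      (List.Pairwise.filter _ List.pairwise_lt_range)
  have htwo : ((PySem.List.dedup (P.map (fun p => p.1))).filter (fun k => !(k == 0))).length
      = (List.range (pvL P).toNat).countP (fun (i : Nat) => !(pvBuck P ((i : Int) + 1)).isEmpty) := by
    have hperm : (((List.range (pvL P).toNat).filter
          (fun (i : Nat) => !(pvBuck P ((i : Int) + 1)).isEmpty)).map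
          (fun (i : Nat) => (i : Int) + 1)).Perm
        ((PySem.List.dedup (P.map (fun p => p.1))).filter (fun k => !(k == 0))) := by
      rw [List.perm_ext_iff_of_nodup (hpair0.imp (fun h => ne_of_lt h))
        (List.Nodup.filter _ hnodupS)]
      intro k
      simp only [List.mem_map, List.mem_filter, List.mem_range, Bool.not_eq_eq_eq_not,
        Bool.not_true, List.isEmpty_eq_false_iff, PySem.List.mem_dedup]
      constructor
      · rintro ⟨i, ⟨hi, hne⟩, rfl⟩
        refine ⟨(pvBuck_ne_nil_iff P _).mp hne, by simp; omega⟩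
      · intro hk
        obtain ⟨⟨p, hp, rfl⟩, hk0⟩ := hk
        have h1 := hPnn p hp
        have h2 := pvL_ge P p hp
        have h3 : (1 : Int) ≤ p.1 := by
          simp at hk0
          omega
        refine ⟨(p.1 - 1).toNat, ⟨by omega, ?_⟩, by omega⟩
        have hcast : ((((p.1 - 1).toNat : Nat)) : Int) + 1 = p.1 := by omega
        rw [hcast]
        exact (pvBuck_ne_nil_iff P _).mpr ⟨p, hp, rfl⟩

    rw [← hperm.length_eq, List.length_map, ← List.countP_eq_length_filter]
  have hlenEq := congrArg List.length heq
  rw [hA, hB, hlenA, List.length_map, PySem.List.length_sorted,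
    List.length_eq_length_filter_add (fun k => k == 0), hone, htwo] at hlenEq
  omega
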